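-- pv_equiv track=rewrite | github.com/degarmo/caseclosure | backend/tracker/detection/detectors/behavioral_patterns.py | _divide_into_periods
-- ===== SOURCE A (Python) =====
-- from typing import Dict, List, Any
--
-- def _divide_into_periods(history: List[Dict], num_periods: int) -> List[List[Dict]]:
--     """Divide history into time periods"""
--     if not history:
--         return []
--
--     period_size = len(history) // num_periods
--     periods = []
--
--     for i in range(num_periods):
--         start = i * period_size
--         end = start + period_size if i < num_periods - 1 else len(history)
--         periods.append(history[start:end])
--
--     return periods
-- ===== SOURCE B (Python) =====
-- def _divide_into_periods(history, num_periods):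
--     """Divide history into time periods by consuming the list with take/drop."""
--     if not history or num_periods < 1:
--         return []
--     period_size = len(history) // num_periods
--     periods = []
--     rest = history
--     for _ in range(num_periods - 1):
--         periods.append(rest[:period_size])
--         rest = rest[period_size:]
--     periods.append(rest)
--     return periods
-- ===== Notes on version B (the rewrite author's own statement) =====
-- stated objective: alternative
-- what changed: B abandons A's index arithmetic entirely: it consumes the list with a shrinking remainder (take period_size / drop period_size per step) and appends whatever is left as the final period, so no start/end indices and no last-period conditional slice exist.
import Mathlib
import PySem

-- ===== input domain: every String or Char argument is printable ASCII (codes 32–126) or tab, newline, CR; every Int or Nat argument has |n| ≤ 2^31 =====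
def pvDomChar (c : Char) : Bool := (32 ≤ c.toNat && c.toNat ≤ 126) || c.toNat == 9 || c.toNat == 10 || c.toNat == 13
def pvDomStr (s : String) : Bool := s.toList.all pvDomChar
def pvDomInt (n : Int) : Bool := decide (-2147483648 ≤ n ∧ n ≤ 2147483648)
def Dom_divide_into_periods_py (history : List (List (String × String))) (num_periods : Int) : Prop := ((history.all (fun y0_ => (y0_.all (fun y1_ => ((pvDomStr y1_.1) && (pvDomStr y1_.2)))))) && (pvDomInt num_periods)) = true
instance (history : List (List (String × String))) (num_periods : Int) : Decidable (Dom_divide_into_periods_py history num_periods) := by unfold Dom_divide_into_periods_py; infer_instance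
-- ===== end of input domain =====

-- B replaces A's index-arithmetic slicing loop by a take/drop pass over a shrinking remainder: alternative decomposition, same O(n) cost.

-- ===== PORT A =====
def divide_into_periods_py (history : List (List (String × String))) (num_periods : Int) : List (List (List (String × String))) :=
  if history = [] then []
  else
    let period_size := PySem.Int.floordiv (history.length : Int) num_periods
    (PySem.List.pyRange 0 num_periods 1).foldl (fun periods i =>
      let start := i * period_size
      let stop := if i < num_periods - 1 then start + period_size else (history.length : Int)
      periods ++ [PySem.List.slice history (some start) (some stop)]) []

-- ===== PORT B =====
-- the loop 'for _ in range(num_periods-1): append rest[:p]; rest = rest[p:]' then 'append rest',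
-- as structural recursion on the number of remaining iterations
def pvChunksB (rest : List (List (String × String))) (p : Int) : Nat → List (List (List (String × String)))
  | 0 => [rest]
  | k + 1 => PySem.List.slice rest none (some p) :: pvChunksB (PySem.List.slice rest (some p) none) p k

def divide_into_periods_py_alt (history : List (List (String × String))) (num_periods : Int) : List (List (List (String × String))) :=
  if history = [] ∨ num_periods < 1 then []
  else
    let period_size := PySem.Int.floordiv (history.length : Int) num_periods
    pvChunksB history period_size (num_periods - 1).toNat

-- ===== PRECONDITION & SPEC =====
-- Pre_ excludes only num_periods = 0 with nonempty history, where Python A raises ZeroDivisionError.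
def Pre_divide_into_periods_py (history : List (List (String × String))) (num_periods : Int) : Prop :=
  history = [] ∨ num_periods ≠ 0
instance (history : List (List (String × String))) (num_periods : Int) : Decidable (Pre_divide_into_periods_py history num_periods) := by unfold Pre_divide_into_periods_py; infer_instance

def pvWitness_divide_into_periods_py : (List (List (String × String))) × Int := ([[("a", "b")], [("c", "d")], [("e", "f")]], 2)

def Spec_divide_into_periods_py (history : List (List (String × String))) (num_periods : Int) (out : List (List (List (String × String)))) : Prop := out = divide_into_periods_py_alt history num_periods
instance (history : List (List (String × String))) (num_periods : Int) (out : List (List (List (String × String)))) : Decidable (Spec_divide_into_periods_py history num_periods out) := by unfold Spec_divide_into_periods_py; infer_instance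

-- ===== CLAIM (what is proved, stated in full; the proofs are below) =====
def Claim_equal_divide_into_periods_py : Prop := ∀ (history : List (List (String × String))) (num_periods : Int), Dom_divide_into_periods_py history num_periods → Pre_divide_into_periods_py history num_periods → Spec_divide_into_periods_py history num_periods (divide_into_periods_py history num_periods)


-- ===== LEMMAS AND PROOFS =====

-- B's chunk recursion, characterised as a map over indices (q = period size as a Nat)
lemma pvChunksB_eq_map (q : Nat) : ∀ (k : Nat) (xs : List (List (String × String))),
    pvChunksB xs (q : Int) k =
      (List.range (k + 1)).map (fun j => if j = k then xs.drop (j * q) else (xs.drop (j * q)).take q) := by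
  intro k
  induction k with
  | zero => intro xs; simp [pvChunksB]
  | succ k ih =>
    intro xs
    rw [List.range_succ_eq_map]
    simp only [List.map_cons, List.map_map]
    rw [show pvChunksB xs (q : Int) (k+1)
        = PySem.List.slice xs none (some (q : Int)) :: pvChunksB (PySem.List.slice xs (some (q : Int)) none) (q : Int) k
        from rfl]
    rw [PySem.List.slice_to_natCast, PySem.List.slice_from_natCast, ih (xs.drop q)]
    congr 1
    · simp
    · apply List.map_congr_left
      intro j _
      simp only [Function.comp, List.drop_drop]
      have harith : j * q + q = (j + 1) * q := by ring
      by_cases hj : j = k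
      · simp only [hj]
        rw [show q + k * q = (k + 1) * q from by ring]
      · have hj' : ¬ (j + 1 = k + 1) := by omega
        simp only [hj', if_neg hj]
        rw [show q + j * q = (j + 1) * q from by ring]
        simp [Nat.succ_eq_add_one]

-- ===== VERDICT (by name: the statement is the Claim_ definition above) =====
theorem divide_into_periods_py_spec : Claim_equal_divide_into_periods_py := by
  intro history num_periods _ hpre
  unfold Spec_divide_into_periods_py divide_into_periods_py divide_into_periods_py_alt
  by_cases hh : history = []
  · simp [hh]
  · by_cases hn : num_periods < 1
    · have hrange : PySem.List.pyRange 0 num_periods 1 = [] := by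
        rw [PySem.List.pyRange_one]
        have h0 : (num_periods - 0).toNat = 0 := by omega
        rw [h0]; rfl
      simp [hh, hn, hrange]
    · have hn1 : 1 ≤ num_periods := by omega
      clear hn
      simp only [hh, false_or, if_false]
      set p := PySem.Int.floordiv (history.length : Int) num_periods with hp
      have hp0 : 0 ≤ p := by
        rw [hp, PySem.Int.floordiv_eq_ediv_of_pos (by omega)]
        exact Int.ediv_nonneg (by positivity) (by omega)
      rw [PySem.List.foldl_append_singleton_eq_map]
      obtain ⟨q, hq⟩ : ∃ q : Nat, p = (q : Int) := ⟨p.toNat, by omega⟩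
      rw [hq, pvChunksB_eq_map]
      have hk1 : (num_periods - 1).toNat + 1 = num_periods.toNat := by omega
      rw [hk1, PySem.List.pyRange_one]
      simp only [sub_zero, List.map_map, List.nil_append, if_neg (by omega : ¬ num_periods < 1)]
      apply List.map_congr_left
      intro j hj
      rw [List.mem_range] at hj
      simp only [Function.comp, zero_add]
      by_cases hlast : (j : Int) < num_periods - 1
      · rw [if_pos hlast, if_neg (by omega : ¬ j = (num_periods - 1).toNat)]
        rw [show (j : Int) * (q : Int) + (q : Int) = ((j * q + q : Nat) : Int) by push_cast; ring,
            show (j : Int) * (q : Int) = ((j * q : Nat) : Int) by push_cast; ring,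
            PySem.List.slice_natCast]
        congr 1
        omega
      · have hje : j = (num_periods - 1).toNat := by omega
        rw [if_neg hlast, if_pos hje]
        rw [show (j : Int) * (q : Int) = ((j * q : Nat) : Int) by push_cast; ring,
            PySem.List.slice_natCast]
        have : history.length - j * q ≤ history.length := by omega
        rw [List.take_of_length_le (by simp)]
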